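-- pv_equiv track=rewrite | github.com/tqmsh/LC | greedy/3261. Count Substrings That Satisfy K-Constraint II.py | countKConstraintSubstrings
-- ===== SOURCE A (Python) =====
-- from typing import List
-- from bisect import bisect_left
-- from collections import defaultdict
--
-- def countKConstraintSubstrings(s: str, k: int, queries: List[List[int]]) -> List[int]:
--
--     s = " " + s
--     cnt = defaultdict(int) # 初始化 [0, 0)
--     L = [1] * len(s); psa = [0] * len(s)
--
--     # 双指针, Sliding Window
--     j = 1
--     for i in range(1, len(s)):
--         cnt[s[i]] += 1
--         while cnt['0'] > k and cnt['1'] > k: cnt[s[j]] -= 1; j += 1 # xxxxxxxx(v)vvvvvvv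
--
--         # cnt: [j, i]
--
--         L[i] = j
--         psa[i] = psa[i - 1] + (i - j + 1) # [j, i], 里面任何一个数，以 i 结尾，都是合法区间
--     ans = []
--     # 二分，枚举 R 找 L
--     for l, r in queries:
--         l += 1; r += 1
--         mn_R = bisect_left(L, l, l, r + 1) # [l, r + 1) 里第一个 idx, L[idx] >= l
--         ans.append((mn_R - l) * (mn_R - l + 1) // 2 + psa[r] - psa[mn_R - 1])
--         # [l, mn_R) 所有子区间合法                     # 剩下的 R = [mn_R, r]
--     return ans
-- ===== SOURCE B (Python) =====
-- from typing import List
-- from collections import defaultdict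
--
-- def countKConstraintSubstrings(s: str, k: int, queries: List[List[int]]) -> List[int]:
--     # identical O(n) sliding window builds L and psa (1-indexed with a sentinel)
--     s = " " + s
--     cnt = defaultdict(int)
--     L = [1] * len(s); psa = [0] * len(s)
--     j = 1
--     for i in range(1, len(s)):
--         cnt[s[i]] += 1
--         while cnt['0'] > k and cnt['1'] > k:
--             cnt[s[j]] -= 1; j += 1
--         L[i] = j
--         psa[i] = psa[i - 1] + (i - j + 1)
--     # instead of a binary search per query: precompute, with one linear sweep,
--     # cross[l] = first idx in [1, len(s)) with L[idx] >= l (len(s) if none),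
--     # then answer each query by an O(1) table lookup clamped to its window.
--     n1 = len(s)
--     cross = []
--     p = 1
--     for l in range(n1 + 1):
--         while p < n1 and L[p] < l:
--             p += 1
--         cross.append(p)
--     ans = []
--     for l, r in queries:
--         l += 1; r += 1
--         mn_R = min(max(cross[l], l), r + 1)
--         ans.append((mn_R - l) * (mn_R - l + 1) // 2 + psa[r] - psa[mn_R - 1])
--     return ans
-- ===== Notes on version B (the rewrite author's own statement) =====
-- stated objective: alternative
-- what changed: B keeps the same O(n) sliding-window build of L/psa but replaces the per-query binary search (bisect_left on [l, r+1)) by a crossing-index table cross[l] = first idx with L[idx] >= l, precomputed in one linear sweep with a monotone pointer, so each query becomes an O(1) clamped table lookup.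
-- outside the precondition, e.g. on countKConstraintSubstrings('0110', 1, [[1, 0]]): A returns [0], B returns [0]; on countKConstraintSubstrings('0110', 1, [[-1, 1]]): A returns [-6], B returns [4]
import Mathlib
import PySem

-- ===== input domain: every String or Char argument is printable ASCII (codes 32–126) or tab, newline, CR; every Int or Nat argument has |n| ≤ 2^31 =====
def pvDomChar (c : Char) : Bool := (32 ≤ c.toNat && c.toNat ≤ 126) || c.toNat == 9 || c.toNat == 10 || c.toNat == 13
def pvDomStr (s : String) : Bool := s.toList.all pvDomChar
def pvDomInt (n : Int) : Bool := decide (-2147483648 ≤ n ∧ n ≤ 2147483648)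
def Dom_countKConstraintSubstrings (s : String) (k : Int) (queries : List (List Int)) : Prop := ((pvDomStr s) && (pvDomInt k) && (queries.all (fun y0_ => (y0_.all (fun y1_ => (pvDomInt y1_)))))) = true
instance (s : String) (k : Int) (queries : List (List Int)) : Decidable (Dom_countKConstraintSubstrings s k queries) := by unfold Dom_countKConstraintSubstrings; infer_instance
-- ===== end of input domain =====

-- B answers each query by an O(1) clamped lookup in a linearly precomputed crossing-index
-- table instead of A's per-query bisect_left; the sliding-window build of L/psa is shared.


-- ===== PORT A =====
-- inner while loop "while cnt['0'] > k and cnt['1'] > k: cnt[s[j]] -= 1; j += 1",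
-- fuel-bounded; fuel = len(s) is enough on every input Pre_ admits (elsewhere the Python
-- loop runs j out of range and raises IndexError).  Shared verbatim by both Pythons.
def pvShrink (k : Int) (cs : List Char) : Nat → PySem.Dict Char Int → Int → PySem.Dict Char Int × Int
  | 0, cnt, j => (cnt, j)
  | fuel + 1, cnt, j =>
    if PySem.Dict.getD cnt '0' 0 > k ∧ PySem.Dict.getD cnt '1' 0 > k then
      let c := PySem.List.pyGetD cs j ' '   -- s[j]; in range wherever the Python loop runs
      pvShrink k cs fuel (PySem.Dict.insert cnt c (PySem.Dict.getD cnt c 0 - 1)) (j + 1)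
    else (cnt, j)

-- one iteration of "for i in range(1, len(s))" of the sliding-window build (identical in Source A and Source B)
def pvBuildStep (k : Int) (cs : List Char) (st : (PySem.Dict Char Int × Int) × List Int × List Int) (i : Int) :
    (PySem.Dict Char Int × Int) × List Int × List Int :=
  let c := PySem.List.pyGetD cs i ' '                                   -- s[i]; i ∈ range(1, len(s)) is in range
  let cnt := PySem.Dict.insert st.1.1 c (PySem.Dict.getD st.1.1 c 0 + 1) -- cnt[s[i]] += 1
  let cj := pvShrink k cs cs.length cnt st.1.2
  let L := PySem.List.pySetD st.2.1 i cj.2                              -- L[i] = j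
  let psa := PySem.List.pySetD st.2.2 i (PySem.List.pyGetD st.2.2 (i - 1) 0 + (i - cj.2 + 1))  -- psa[i] = psa[i-1] + (i-j+1)
  (cj, L, psa)

def countKConstraintSubstrings (s : String) (k : Int) (queries : List (List Int)) : List Int :=
  let cs := ' ' :: s.toList                                             -- s = " " + s
  let n : Int := cs.length
  let st := (PySem.List.pyRange 1 n 1).foldl (pvBuildStep k cs)
      ((PySem.Dict.empty, 1), List.replicate cs.length 1, List.replicate cs.length 0)
  let L := st.2.1
  let psa := st.2.2
  queries.map (fun q =>
    -- "for l, r in queries": q = [l, r] on every input Pre_ admits (elsewhere Python raises ValueError)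
    let l := PySem.List.pyGetD q 0 0 + 1
    let r := PySem.List.pyGetD q 1 0 + 1
    -- mn_R = bisect_left(L, l, l, r + 1); exact wherever Python's bisect does not raise (0 ≤ lo, Pre_)
    let mnR : Int := (PySem.List.bisectLeftLoop L l L.length l.toNat (r + 1).toNat : Nat)
    PySem.Int.floordiv ((mnR - l) * (mnR - l + 1)) 2 + PySem.List.pyGetD psa r 0 - PySem.List.pyGetD psa (mnR - 1) 0)

-- ===== PORT B =====
-- B's inner while loop "while p < n1 and L[p] < l: p += 1" (well-founded: p increases towards n)
def pvAdvance (L : List Int) (n l p : Int) : Int :=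
  if h : p < n ∧ PySem.List.pyGetD L p 0 < l then pvAdvance L n l (p + 1) else p
  termination_by (n - p).toNat
  decreasing_by
    have := h.1
    omega

def countKConstraintSubstrings_alt (s : String) (k : Int) (queries : List (List Int)) : List Int :=
  let cs := ' ' :: s.toList                                             -- s = " " + s
  let n : Int := cs.length
  let st := (PySem.List.pyRange 1 n 1).foldl (pvBuildStep k cs)
      ((PySem.Dict.empty, 1), List.replicate cs.length 1, List.replicate cs.length 0)
  let L := st.2.1
  let psa := st.2.2
  -- cross[l] = first idx in [1, n1) with L[idx] >= l (n1 if none), one linear sweep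
  let cp := (PySem.List.pyRange 0 (n + 1) 1).foldl (fun (st : List Int × Int) l =>
      let p := pvAdvance L n l st.2
      (st.1 ++ [p], p)) ([], 1)
  let cross := cp.1
  queries.map (fun q =>
    -- "for l, r in queries": q = [l, r] on every input Pre_ admits (elsewhere Python raises ValueError)
    let l := PySem.List.pyGetD q 0 0 + 1
    let r := PySem.List.pyGetD q 1 0 + 1
    let mnR : Int := min (max (PySem.List.pyGetD cross l 0) l) (r + 1)
    PySem.Int.floordiv ((mnR - l) * (mnR - l + 1)) 2 + PySem.List.pyGetD psa r 0 - PySem.List.pyGetD psa (mnR - 1) 0)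

-- ===== PRECONDITION & SPEC =====
-- Pre_ excludes (i) k < 0 with s nonempty, where A's shrinking loop runs off the string and raises
-- IndexError, and (ii) queries that are not [l, r] with 0 ≤ l ≤ r < len(s): there A raises
-- (ValueError/IndexError) or, on a few corners (l > r, l = -1, negative r), returns an accidental
-- value produced by Python's negative-index wraparound and an empty bisect range.
def Pre_countKConstraintSubstrings (s : String) (k : Int) (queries : List (List Int)) : Prop :=
  (0 ≤ k ∨ s = "") ∧
  ∀ q ∈ queries, q.length = 2 ∧ 0 ≤ q.getD 0 0 ∧ q.getD 0 0 ≤ q.getD 1 0 ∧ q.getD 1 0 < PySem.Str.len s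

instance (s : String) (k : Int) (queries : List (List Int)) : Decidable (Pre_countKConstraintSubstrings s k queries) := by
  unfold Pre_countKConstraintSubstrings; infer_instance

def pvWitness_countKConstraintSubstrings : String × Int × List (List Int) := ("10101", 1, [[0, 4], [1, 3], [2, 2]])

def Spec_countKConstraintSubstrings (s : String) (k : Int) (queries : List (List Int)) (out : List Int) : Prop := out = countKConstraintSubstrings_alt s k queries
instance (s : String) (k : Int) (queries : List (List Int)) (out : List Int) : Decidable (Spec_countKConstraintSubstrings s k queries out) := by unfold Spec_countKConstraintSubstrings; infer_instance

-- ===== CLAIM (what is proved, stated in full; the proofs are below) =====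
def Claim_equal_countKConstraintSubstrings : Prop := ∀ (s : String) (k : Int) (queries : List (List Int)), Dom_countKConstraintSubstrings s k queries → Pre_countKConstraintSubstrings s k queries → Spec_countKConstraintSubstrings s k queries (countKConstraintSubstrings s k queries)

-- ===== LEMMAS AND PROOFS =====

-- "g is the first index ≥ 1 at which L[g] ≥ x (L.length if none)"
def pvIsFirst (L : List Int) (x g : Int) : Prop :=
  1 ≤ g ∧ g ≤ L.length ∧ (g = (L.length : Int) ∨ x ≤ PySem.List.pyGetD L g 0) ∧
  ∀ u : Int, 1 ≤ u → u < g → PySem.List.pyGetD L u 0 < x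

-- L is nondecreasing on indices ≥ 1
def pvMono (L : List Int) : Prop :=
  ∀ a b : Int, 1 ≤ a → a ≤ b → b < L.length → PySem.List.pyGetD L a 0 ≤ PySem.List.pyGetD L b 0

theorem pvShrink_le (k : Int) (cs : List Char) :
    ∀ (fuel : Nat) (cnt : PySem.Dict Char Int) (j : Int), j ≤ (pvShrink k cs fuel cnt j).2 := by
  intro fuel
  induction fuel with
  | zero => intro cnt j; simp [pvShrink]
  | succ fuel ih =>
    intro cnt j
    rw [pvShrink]
    split
    · exact le_trans (by omega) (ih _ (j + 1))
    · simp

-- invariant of the sliding-window build after the first m-1 iterations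
theorem pvBuild_inv (k : Int) (cs : List Char) :
    ∀ m : Nat, 1 ≤ m → m ≤ cs.length →
    (let st := (PySem.List.pyRange 1 (m : Int) 1).foldl (pvBuildStep k cs)
        ((PySem.Dict.empty, 1), List.replicate cs.length 1, List.replicate cs.length 0)
     1 ≤ st.1.2 ∧ st.2.1.length = cs.length ∧ st.2.2.length = cs.length ∧
     (∀ a b : Int, 1 ≤ a → a ≤ b → b < (m : Int) → PySem.List.pyGetD st.2.1 a 0 ≤ PySem.List.pyGetD st.2.1 b 0) ∧
     (∀ a : Int, 1 ≤ a → a < (m : Int) → PySem.List.pyGetD st.2.1 a 0 ≤ st.1.2)) := by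
  intro m
  induction m with
  | zero => intro h; omega
  | succ m ih =>
    intro _ hm1
    by_cases hm : 1 ≤ m
    case neg =>
      -- m = 0, so m+1 = 1: the range is empty, state is the initial state
      have : m = 0 := by omega
      subst this
      rw [show ((0 + 1 : Nat) : Int) = 1 from rfl, PySem.List.pyRange_one_eq_nil (le_refl 1)]
      simp only [List.foldl_nil]
      refine ⟨le_refl 1, List.length_replicate, List.length_replicate, ?_, ?_⟩
      · intro a b ha hab hb; omega
      · intro a ha hb; omega
    case pos =>
      have ihh := ih hm (by omega)
      obtain ⟨ih1, ih2, ih3, ih4, ih5⟩ := ihh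
      have hcast : ((m + 1 : Nat) : Int) = (m : Int) + 1 := by push_cast; ring
      rw [hcast, PySem.List.pyRange_one_succ_right (by exact_mod_cast hm), List.foldl_append]
      simp only [List.foldl_cons, List.foldl_nil]
      -- abbreviate the previous state
      set st := (PySem.List.pyRange 1 (m : Int) 1).foldl (pvBuildStep k cs)
        ((PySem.Dict.empty, 1), List.replicate cs.length 1, List.replicate cs.length 0) with hst
      show 1 ≤ (pvBuildStep k cs st (m : Int)).1.2 ∧ _
      rw [pvBuildStep]
      simp only
      have hjle : st.1.2 ≤ (pvShrink k cs cs.length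
          (PySem.Dict.insert st.1.1 (PySem.List.pyGetD cs (m : Int) ' ')
            (PySem.Dict.getD st.1.1 (PySem.List.pyGetD cs (m : Int) ' ') 0 + 1)) st.1.2).2 :=
        pvShrink_le k cs _ _ _
      set j' := (pvShrink k cs cs.length
          (PySem.Dict.insert st.1.1 (PySem.List.pyGetD cs (m : Int) ' ')
            (PySem.Dict.getD st.1.1 (PySem.List.pyGetD cs (m : Int) ' ') 0 + 1)) st.1.2).2 with hj'
      have hmlen : m < cs.length := by omega
      have hmlt : m < st.2.1.length := by omega
      refine ⟨by omega, by rw [PySem.List.length_pySetD]; exact ih2, by rw [PySem.List.length_pySetD]; exact ih3, ?_, ?_⟩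
      · intro a b ha hab hb
        have haN : ((a.toNat : Nat) : Int) = a := Int.toNat_of_nonneg (by omega)
        have hbN : ((b.toNat : Nat) : Int) = b := Int.toNat_of_nonneg (by omega)
        rw [← haN, ← hbN, PySem.List.pyGetD_pySetD_natCast _ _ _ _ _ (by omega),
            PySem.List.pyGetD_pySetD_natCast _ _ _ _ _ (by omega)]
        split_ifs with h1 h2 h2
        · omega
        · omega
        · simp only [haN]
          have := ih5 a ha (by omega)
          omega
        · simp only [haN, hbN]
          exact ih4 a b ha hab (by omega)
      · intro a ha hb
        have haN : ((a.toNat : Nat) : Int) = a := Int.toNat_of_nonneg (by omega)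
        rw [← haN, PySem.List.pyGetD_pySetD_natCast _ _ _ _ _ (by omega)]
        split_ifs with h1
        · omega
        · simp only [haN]
          have := ih5 a ha (by omega)
          omega

theorem pvAdvance_isFirst (L : List Int) (n l : Int) (hn : n = (L.length : Int)) :
    ∀ p : Int, 1 ≤ p → p ≤ n → (∀ u : Int, 1 ≤ u → u < p → PySem.List.pyGetD L u 0 < l) →
    pvIsFirst L l (pvAdvance L n l p) ∧ p ≤ pvAdvance L n l p := by
  intro p
  induction p using pvAdvance.induct L n l with
  | case1 p h ih =>
    intro h1 h2 hb
    rw [pvAdvance, dif_pos h]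
    have := ih (by omega) (by omega) (by
      intro u hu1 hu2
      rcases lt_or_eq_of_le (show u ≤ p by omega) with h' | h'
      · exact hb u hu1 h'
      · subst h'; exact h.2)
    exact ⟨this.1, by omega⟩
  | case2 p h =>
    intro hp1 hp2 hb
    rw [pvAdvance, dif_neg h]
    push Not at h
    refine ⟨⟨hp1, by omega, ?_, hb⟩, le_refl p⟩
    by_cases hpn : p < n
    · exact Or.inr (h hpn)
    · exact Or.inl (by omega)

-- invariant of the cross-table sweep after the first m iterations
theorem pvCross_inv (L : List Int) (n : Int) (hn : n = (L.length : Int)) (hn1 : 1 ≤ n) :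
    ∀ m : Nat,
    (let cp := (PySem.List.pyRange 0 (m : Int) 1).foldl (fun (st : List Int × Int) l =>
        (st.1 ++ [pvAdvance L n l st.2], pvAdvance L n l st.2)) ([], 1)
     cp.1.length = m ∧ 1 ≤ cp.2 ∧ cp.2 ≤ n ∧
     (∀ u : Int, 1 ≤ u → u < cp.2 → PySem.List.pyGetD L u 0 < (m : Int) - 1) ∧
     (∀ t : Nat, t < m → pvIsFirst L (t : Int) (cp.1.getD t 0))) := by
  intro m
  induction m with
  | zero =>
    rw [show ((0 : Nat) : Int) = 0 from rfl, PySem.List.pyRange_one_eq_nil (le_refl 0)]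
    simp only [List.foldl_nil]
    exact ⟨rfl, le_refl 1, hn1, by intro u h1 h2; omega, by intro t ht; omega⟩
  | succ m ih =>
    have hcast : ((m + 1 : Nat) : Int) = (m : Int) + 1 := by push_cast; ring
    rw [hcast, PySem.List.pyRange_one_succ_right (by positivity), List.foldl_append]
    simp only [List.foldl_cons, List.foldl_nil]
    obtain ⟨ih1, ih2, ih3, ih4, ih5⟩ := ih
    have hadv := pvAdvance_isFirst L n (m : Int) hn _ ih2 ih3 (by
      intro u hu1 hu2
      have := ih4 u hu1 hu2
      omega)
    obtain ⟨⟨f1, f2, f3, f4⟩, hple⟩ := hadv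
    refine ⟨by simp [ih1], f1, by omega, ?_, ?_⟩
    · intro u hu1 hu2
      have := f4 u hu1 hu2
      omega
    · intro t ht
      by_cases htm : t < m
      · rw [List.getD_append _ _ _ _ (by omega)]
        exact ih5 t htm
      · have : t = m := by omega
        subst this
        rw [List.getD_append_right _ _ _ _ (by omega)]
        simp [ih1]
        exact ⟨f1, f2, f3, f4⟩

theorem pvBisect_eq (L : List Int) (x g : Int) (mono : pvMono L) (hg : pvIsFirst L x g) :
    ∀ (fuel lo hi : Nat), hi - lo ≤ fuel → 1 ≤ lo → lo ≤ hi → hi ≤ L.length →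
    ((PySem.List.bisectLeftLoop L x fuel lo hi : Nat) : Int) = min (max g (lo : Int)) (hi : Int) := by
  obtain ⟨hg1, hg2, hg3, hg4⟩ := hg
  intro fuel
  induction fuel with
  | zero =>
    intro lo hi hf h1 hlh hhi
    have : hi = lo := by omega
    subst this
    simp [PySem.List.bisectLeftLoop]
  | succ fuel ih =>
    intro lo hi hf h1 hlh hhi
    rw [PySem.List.bisectLeftLoop]
    by_cases hlt : lo < hi
    · rw [if_pos hlt]
      set mid := (lo + hi) / 2 with hmid
      have hmlo : lo ≤ mid := by omega
      have hmhi : mid < hi := by omega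
      have hmlen : mid < L.length := by omega
      rw [List.getElem?_eq_getElem hmlen]
      dsimp only
      have hgetd : L[mid] = PySem.List.pyGetD L (mid : Int) 0 := by
        rw [PySem.List.pyGetD_natCast, List.getD_eq_getElem L 0 hmlen]
      by_cases hcmp : L[mid] < x
      · rw [if_pos hcmp]
        -- mid < g
        have hmg : (mid : Int) < g := by
          by_contra hc
          push Not at hc
          have hglen : g < (L.length : Int) := by omega
          rcases hg3 with h' | h'
          · omega
          · have := mono g (mid : Int) hg1 (by omega) (by omega)
            rw [← hgetd] at this
            omega
        rw [ih (mid + 1) hi (by omega) (by omega) (by omega) hhi]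
        omega
      · rw [if_neg hcmp]
        have hgm : g ≤ (mid : Int) := by
          by_contra hc
          push Not at hc
          have := hg4 (mid : Int) (by omega) (by omega)
          rw [← hgetd] at this
          omega
        rw [ih lo mid (by omega) h1 (by omega) (by omega)]
        omega
    · rw [if_neg hlt]
      omega

-- ===== VERDICT (by name: the statement is the Claim_ definition above) =====
theorem countKConstraintSubstrings_spec : Claim_equal_countKConstraintSubstrings := by
  intro s k queries _dom hpre
  unfold Spec_countKConstraintSubstrings countKConstraintSubstrings countKConstraintSubstrings_alt
  apply List.map_congr_left
  intro q hq
  obtain ⟨hqlen, hq0, hq01, hq1⟩ := hpre.2 q hq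
  rcases q with _ | ⟨a, _ | ⟨b, _ | ⟨c, t⟩⟩⟩ <;> simp only [List.length_nil, List.length_cons] at hqlen <;> try omega
  clear hqlen
  simp only [List.getD_cons_zero, List.getD_cons_succ] at hq0 hq01 hq1
  rw [PySem.Str.len_eq] at hq1
  dsimp only
  rw [show PySem.List.pyGetD [a, b] 0 0 = a from rfl, show PySem.List.pyGetD [a, b] 1 0 = b from rfl]
  set cs := ' ' :: s.toList with hcs
  have hcslen : cs.length = s.toList.length + 1 := by rw [hcs]; exact List.length_cons ..
  have hinv := pvBuild_inv k cs cs.length (by omega) (le_refl _)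
  set st := List.foldl (pvBuildStep k cs)
      ((PySem.Dict.empty, 1), List.replicate cs.length 1, List.replicate cs.length 0)
      (PySem.List.pyRange 1 (cs.length : Int) 1) with hst
  obtain ⟨hj1, hLlen, hpsalen, hmono, hbnd⟩ := hinv
  set L := st.2.1 with hL
  have hmono' : pvMono L := by
    intro x y hx hxy hy
    exact hmono x y hx hxy (by omega)
  have hcr := pvCross_inv L (cs.length : Int) (by rw [hLlen]) (by omega) (cs.length + 1)
  rw [show (((cs.length + 1 : Nat)) : Int) = (cs.length : Int) + 1 by push_cast; ring] at hcr
  obtain ⟨hclen, _, _, _, hcfirst⟩ := hcr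
  set cross := (List.foldl (fun (st : List Int × Int) l =>
      (st.1 ++ [pvAdvance L (cs.length : Int) l st.2], pvAdvance L (cs.length : Int) l st.2)) ([], 1)
      (PySem.List.pyRange 0 ((cs.length : Int) + 1) 1)).1 with hcross
  have hxN : (((a + 1).toNat : Nat) : Int) = a + 1 := Int.toNat_of_nonneg (by omega)
  have hyN : (((b + 1 + 1).toNat : Nat) : Int) = b + 1 + 1 := Int.toNat_of_nonneg (by omega)
  have hfirst : pvIsFirst L (a + 1) (cross.getD (a + 1).toNat 0) := by
    have := hcfirst (a + 1).toNat (by omega)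
    rw [hxN] at this
    exact this
  rw [pvBisect_eq L (a + 1) (cross.getD (a + 1).toNat 0) hmono' hfirst L.length
      (a + 1).toNat (b + 1 + 1).toNat (by omega) (by omega) (by omega) (by omega)]
  rw [show PySem.List.pyGetD cross (a + 1) 0 = cross.getD (a + 1).toNat 0 by
      rw [← hxN, PySem.List.pyGetD_natCast, Int.toNat_natCast]]
  rw [hxN, hyN]
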